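-- pv_equiv track=rewrite | github.com/alexanderhaire/mod | app.py | _latest_question_answer
-- ===== SOURCE A (Python) =====
-- def _latest_question_answer(messages: list[dict]) -> tuple[int | None, dict | None, dict | None]:
--     """Return the index and pair of the latest user/assistant messages."""
--     for idx in range(len(messages) - 1, -1, -1):
--         msg = messages[idx]
--         if msg.get("role") == "assistant":
--             # Find the nearest preceding user message.
--             for j in range(idx - 1, -1, -1):
--                 prior = messages[j]
--                 if prior.get("role") == "user":
--                     return idx, prior, msg
--             return idx, None, msg
--     return None, None, None
-- ===== SOURCE B (Python) =====
-- def _latest_question_answer(messages: list[dict]) -> tuple[int | None, dict | None, dict | None]: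
--     """Return the index and pair of the latest user/assistant messages.
--
--     Single forward pass: remember the most recent user message seen so far,
--     and overwrite the result at every assistant message.
--     """
--     last_user = None
--     result = (None, None, None)
--     for idx, msg in enumerate(messages):
--         role = msg.get("role")
--         if role == "user":
--             last_user = msg
--         elif role == "assistant":
--             result = (idx, last_user, msg)
--     return result
-- ===== Notes on version B (the rewrite author's own statement) =====
-- stated objective: simpler
-- what changed: Replaced the nested backward scans (find last assistant, then rescan backwards for the preceding user) with one forward pass that tracks the latest user seen and overwrites the result at each assistant.
import Mathlib
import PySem

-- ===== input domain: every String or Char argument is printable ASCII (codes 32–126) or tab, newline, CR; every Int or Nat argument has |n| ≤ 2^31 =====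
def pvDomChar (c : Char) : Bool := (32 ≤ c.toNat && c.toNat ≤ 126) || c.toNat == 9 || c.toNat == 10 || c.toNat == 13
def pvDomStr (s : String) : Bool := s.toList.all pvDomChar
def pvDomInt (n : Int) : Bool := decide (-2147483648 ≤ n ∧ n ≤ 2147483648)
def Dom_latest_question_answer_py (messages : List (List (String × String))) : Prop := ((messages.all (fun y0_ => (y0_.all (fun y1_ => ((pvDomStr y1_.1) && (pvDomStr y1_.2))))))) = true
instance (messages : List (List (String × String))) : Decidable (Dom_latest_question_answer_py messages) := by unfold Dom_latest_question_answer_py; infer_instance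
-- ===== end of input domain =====

-- B replaces A's nested backward scans with one forward pass tracking the last user message; simpler, same results.


-- ===== PORT A =====
-- inner backward loop: `for j in range(idx - 1, -1, -1)`; the argument n is the number of
-- indices still to visit (first index visited is n-1, descending to 0).  The `none` branch of
-- the index lookup is unreachable (every visited index is < messages.length).
def pvAInner (messages : List (List (String × String))) : Nat → Option (List (String × String))
  | 0 => none
  | j + 1 =>
    match messages[j]? with
    | some prior =>
        if (PySem.Dict.mk prior).get? "role" = some "user" then some prior
        else pvAInner messages j
    | none => pvAInner messages j

-- outer backward loop: `for idx in range(len(messages) - 1, -1, -1)`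
def pvAOuter (messages : List (List (String × String))) : Nat → Option Int × (Option (List (String × String))) × (Option (List (String × String)))
  | 0 => (none, none, none)
  | i + 1 =>
    match messages[i]? with
    | some msg =>
        if (PySem.Dict.mk msg).get? "role" = some "assistant" then
          (some (i : Int), pvAInner messages i, some msg)
        else pvAOuter messages i
    | none => pvAOuter messages i

def latest_question_answer_py (messages : List (List (String × String))) : Option Int × (Option (List (String × String))) × (Option (List (String × String))) :=
  pvAOuter messages messages.length

-- ===== PORT B =====
-- loop body of B: state is (last_user, result)
def pvBStep (st : Option (List (String × String)) × (Option Int × (Option (List (String × String))) × (Option (List (String × String)))))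
    (p : Int × List (String × String)) :
    Option (List (String × String)) × (Option Int × (Option (List (String × String))) × (Option (List (String × String)))) :=
  let role := (PySem.Dict.mk p.2).get? "role"
  if role = some "user" then (some p.2, st.2)
  else if role = some "assistant" then (st.1, (some p.1, st.1, some p.2))
  else st

def latest_question_answer_py_alt (messages : List (List (String × String))) : Option Int × (Option (List (String × String))) × (Option (List (String × String))) :=
  ((PySem.List.enumerate messages 0).foldl pvBStep (none, (none, none, none))).2

-- ===== PRECONDITION & SPEC =====
def Spec_latest_question_answer_py (messages : List (List (String × String))) (out : Option Int × (Option (List (String × String))) × (Option (List (String × String)))) : Prop := out = latest_question_answer_py_alt messages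
instance (messages : List (List (String × String))) (out : Option Int × (Option (List (String × String))) × (Option (List (String × String)))) : Decidable (Spec_latest_question_answer_py messages out) := by unfold Spec_latest_question_answer_py; infer_instance

-- ===== CLAIM (what is proved, stated in full; the proofs are below) =====
def Claim_equal_latest_question_answer_py : Prop := ∀ (messages : List (List (String × String))), Dom_latest_question_answer_py messages → Spec_latest_question_answer_py messages (latest_question_answer_py messages)

-- ===== LEMMAS AND PROOFS =====

-- appending a message does not change the inner scan over the first n indices
theorem pvAInner_append (l : List (List (String × String))) (m : List (String × String))
    (n : Nat) (h : n ≤ l.length) : pvAInner (l ++ [m]) n = pvAInner l n := by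
  induction n with
  | zero => rfl
  | succ j ih =>
      have hj : j < l.length := h
      simp only [pvAInner, List.getElem?_append_left hj, ih (Nat.le_of_lt hj)]

-- appending a message does not change the outer scan over the first n indices
theorem pvAOuter_append (l : List (List (String × String))) (m : List (String × String))
    (n : Nat) (h : n ≤ l.length) : pvAOuter (l ++ [m]) n = pvAOuter l n := by
  induction n with
  | zero => rfl
  | succ i ih =>
      have hi : i < l.length := h
      simp only [pvAOuter, List.getElem?_append_left hi, ih (Nat.le_of_lt hi),
        pvAInner_append l m i (Nat.le_of_lt hi)]

-- loop invariant of B's single forward pass: after processing l, the state holds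
-- A's inner backward scan of all of l (the last user message) and A's full result on l.
theorem pvB_invariant (l : List (List (String × String))) :
    ((PySem.List.enumerate l 0).foldl pvBStep (none, (none, none, none))).1 = pvAInner l l.length ∧
    ((PySem.List.enumerate l 0).foldl pvBStep (none, (none, none, none))).2 = pvAOuter l l.length := by
  induction l using List.reverseRecOn with
  | nil => exact ⟨rfl, rfl⟩
  | append_singleton l m ih =>
      obtain ⟨ih1, ih2⟩ := ih
      have henum : PySem.List.enumerate (l ++ [m]) 0
          = PySem.List.enumerate l 0 ++ [((l.length : Int), m)] := by
        simp [PySem.List.enumerate_append, PySem.List.enumerate]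
      have hget : (l ++ [m])[l.length]? = some m := by
        simp
      have hlen : (l ++ [m]).length = l.length + 1 := by simp
      rw [henum, List.foldl_append, hlen]
      simp only [List.foldl]
      have hAi := pvAInner_append l m l.length le_rfl
      have hAo := pvAOuter_append l m l.length le_rfl
      by_cases hu : ({ items := m } : PySem.Dict String String).get? "role" = some "user"
      · constructor
        · simp [pvBStep, pvAInner, hu]
        · have hna : ¬ ({ items := m } : PySem.Dict String String).get? "role" = some "assistant" := by
            rw [hu]; simp
          simp [pvBStep, pvAOuter, hu, ih2, hAo]
      · by_cases ha : ({ items := m } : PySem.Dict String String).get? "role" = some "assistant"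
        · constructor
          · simp [pvBStep, pvAInner, ha, ih1, hAi]
          · simp [pvBStep, pvAOuter, ha, ih1, hAi]
        · constructor
          · simp [pvBStep, pvAInner, hu, ha, ih1, hAi]
          · simp [pvBStep, pvAOuter, hu, ha, ih2, hAo]

-- ===== VERDICT (by name: the statement is the Claim_ definition above) =====
theorem latest_question_answer_py_spec : Claim_equal_latest_question_answer_py := by
  intro messages _
  unfold Spec_latest_question_answer_py latest_question_answer_py latest_question_answer_py_alt
  exact (pvB_invariant messages).2.symm
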